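-- pv_equiv track=rewrite | github.com/blasfir/srom-1-2 | lab1-2.py | longCmp
-- ===== SOURCE A (Python) =====
-- def toTheSameLength(A, B):
--     if len(A) < len(B):
--         A = A + [0] * (len(B) - len(A))
--     if len(A) > len(B):
--         B = B + [0] * (len(A) - len(B))
--     return A, B
--
-- def deleteExtraZeros(A):
--     while A and A[-1] == 0:
--         A.pop()
--     if not A:
--         return [0]
--     return A
--
-- def longCmp(A, B):
--     A, B = deleteExtraZeros(A), deleteExtraZeros(B)
--     A, B = toTheSameLength(A, B)
--     i = len(A) - 1
--     while A[i] == B[i]: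
--         i = i-1
--         if i == -1:
--             return 0
--     else:
--         if A[i] > B[i]:
--             return 1
--         else:
--             return -1
-- ===== SOURCE B (Python) =====
-- def longCmp(A, B):
--     # Single ascending (least-significant-first) pass with an accumulator:
--     # the sign of the LAST differing position is the answer, since the most
--     # significant differing digit decides the comparison. No early return,
--     # no stripping, no padding; missing positions count as 0.
--     res = 0
--     for i in range(max(len(A), len(B))):
--         x = A[i] if i < len(A) else 0
--         y = B[i] if i < len(B) else 0
--         if x != y:
--             res = 1 if x > y else -1
--     return res
-- ===== Notes on version B (the rewrite author's own statement) =====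
-- stated objective: simpler
-- what changed: B replaces A's strip+pad preprocessing and descending first-difference early-return loop by one ascending (LSB-first) fold keeping the sign of the last differing position in an accumulator; order is reversed and no intermediate lists are built (return value only: A mutates its arguments via pop, B does not).
import Mathlib
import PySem

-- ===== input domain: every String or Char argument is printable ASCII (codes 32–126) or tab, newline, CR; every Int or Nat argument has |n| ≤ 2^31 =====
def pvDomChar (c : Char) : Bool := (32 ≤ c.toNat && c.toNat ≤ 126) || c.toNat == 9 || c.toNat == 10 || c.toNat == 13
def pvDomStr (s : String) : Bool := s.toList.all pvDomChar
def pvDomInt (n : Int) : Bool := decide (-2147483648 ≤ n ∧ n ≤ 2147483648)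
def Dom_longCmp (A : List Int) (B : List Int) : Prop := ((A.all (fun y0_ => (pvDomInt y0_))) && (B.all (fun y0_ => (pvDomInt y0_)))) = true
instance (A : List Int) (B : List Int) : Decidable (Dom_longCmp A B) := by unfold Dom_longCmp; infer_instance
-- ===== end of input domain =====

-- B replaces A's strip+pad preprocessing and descending early-return scan by one ascending
-- (LSB-first) fold keeping the sign of the last differing position; equivalence is about the
-- RETURN value only — Python A mutates its arguments in place (pop), B does not.

-- ===== PORT A =====
-- while A and A[-1] == 0: A.pop()
def delLoop (A : List Int) : List Int :=
  if A = [] then A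
  else if A.getLastD 0 = 0 then delLoop A.dropLast
  else A
termination_by A.length
decreasing_by
  rename_i h _
  have : A.length ≠ 0 := fun hl => h (List.eq_nil_of_length_eq_zero hl)
  simp [List.length_dropLast]; omega

def deleteExtraZeros (A : List Int) : List Int :=
  if delLoop A = [] then [0] else delLoop A

def toTheSameLength (A : List Int) (B : List Int) : List Int × List Int :=
  let A1 := if A.length < B.length then A ++ List.replicate (B.length - A.length) 0 else A
  let B1 := if A1.length > B.length then B ++ List.replicate (A1.length - B.length) 0 else B
  (A1, B1)

-- the while loop 'while A[i] == B[i]: …'; indices are always in range when called from longCmp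
-- (equal lengths ≥ 1, i starts at len-1 and the loop returns at i = -1), so pyGetD is exact there;
-- the 'i < 0' guard only makes the recursion total and is never reached from longCmp.
def cmpLoop (A B : List Int) (i : Int) : Int :=
  if i < 0 then 0
  else if PySem.List.pyGetD A i 0 = PySem.List.pyGetD B i 0 then
    if i - 1 = -1 then 0 else cmpLoop A B (i - 1)
  else if PySem.List.pyGetD A i 0 > PySem.List.pyGetD B i 0 then 1 else -1
termination_by i.toNat
decreasing_by rename_i h _ _; omega

def longCmp (A : List Int) (B : List Int) : Int :=
  let A1 := deleteExtraZeros A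
  let B1 := deleteExtraZeros B
  let p := toTheSameLength A1 B1
  cmpLoop p.1 p.2 ((p.1.length : Int) - 1)

-- ===== PORT B =====
-- res = 0; for i in range(max(len(A), len(B))): … if x != y: res = 1 if x > y else -1
def longCmp_alt (A : List Int) (B : List Int) : Int :=
  (List.range (max A.length B.length)).foldl
    (fun res i =>
      let x := A.getD i 0
      let y := B.getD i 0
      if x ≠ y then (if x > y then 1 else -1) else res) 0

-- ===== PRECONDITION & SPEC =====
def Spec_longCmp (A : List Int) (B : List Int) (out : Int) : Prop := out = longCmp_alt A B
instance (A : List Int) (B : List Int) (out : Int) : Decidable (Spec_longCmp A B out) := by unfold Spec_longCmp; infer_instance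

-- ===== CLAIM (what is proved, stated in full; the proofs are below) =====
def Claim_equal_longCmp : Prop := ∀ (A : List Int) (B : List Int), Dom_longCmp A B → Spec_longCmp A B (longCmp A B)

-- ===== LEMMAS AND PROOFS =====

-- proof-only intermediary: the descending 'sign of the highest differing index < n' function
def hiDiff (A B : List Int) : Nat → Int
  | 0 => 0
  | i + 1 =>
    let x := A.getD i 0
    let y := B.getD i 0
    if x ≠ y then (if x > y then 1 else -1) else hiDiff A B i

-- B's ascending fold computes the same value: the last update wins = the highest differing index
theorem foldl_eq_hiDiff (A B : List Int) (n : Nat) :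
    (List.range n).foldl
      (fun res i =>
        let x := A.getD i 0
        let y := B.getD i 0
        if x ≠ y then (if x > y then 1 else -1) else res) 0 = hiDiff A B n := by
  induction n with
  | zero => rfl
  | succ m ih =>
    rw [List.range_succ, List.foldl_append, ih, hiDiff]
    simp only [List.foldl_cons, List.foldl_nil]

theorem longCmp_alt_eq (A B : List Int) :
    longCmp_alt A B = hiDiff A B (max A.length B.length) :=
  foldl_eq_hiDiff A B _

-- appending zeros does not change getD-with-default-0 at any index
theorem pad_getD (X : List Int) (k i : Nat) :
    (X ++ List.replicate k (0:Int)).getD i 0 = X.getD i 0 := by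
  by_cases h : i < X.length
  · simp [List.getD_eq_getElem?_getD, List.getElem?_append, h]
  · rw [List.getD_eq_getElem?_getD, List.getD_eq_getElem?_getD,
      List.getElem?_eq_none (l := X) (by omega),
      List.getElem?_append_right (by omega), List.getElem?_replicate]
    split <;> simp

theorem delLoop_getD (A : List Int) (i : Nat) :
    (delLoop A).getD i 0 = A.getD i 0 := by
  fun_induction delLoop A with
  | case1 => rfl
  | case2 A hne h0 ih =>
    rw [ih]
    have hlast : A.getLast hne = 0 := by
      rwa [List.getLastD_eq_getLast?, List.getLast?_eq_some_getLast hne, Option.getD_some] at h0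
    conv_rhs => rw [← List.dropLast_append_getLast hne, hlast]
    have := pad_getD A.dropLast 1 i
    simpa using this.symm
  | case3 => rfl

theorem dez_getD (A : List Int) (i : Nat) :
    (deleteExtraZeros A).getD i 0 = A.getD i 0 := by
  unfold deleteExtraZeros
  split
  · rename_i h
    rw [← delLoop_getD A i, h]
    cases i <;> simp
  · exact delLoop_getD A i

theorem dez_ne_nil (A : List Int) : deleteExtraZeros A ≠ [] := by
  unfold deleteExtraZeros
  split
  · simp
  · assumption

theorem dez_getD_of_ge (A : List Int) (i : Nat) (h : (deleteExtraZeros A).length ≤ i) :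
    A.getD i 0 = 0 := by
  rw [← dez_getD A i, List.getD_eq_default _ _ h]

-- the padded pair from A's preprocessing: getD is unchanged and the first length is the max
theorem tsl_fst_getD (X Y : List Int) (i : Nat) :
    (toTheSameLength X Y).1.getD i 0 = X.getD i 0 := by
  dsimp only [toTheSameLength]
  split
  · exact pad_getD X _ i
  · rfl

theorem tsl_snd_getD (X Y : List Int) (i : Nat) :
    (toTheSameLength X Y).2.getD i 0 = Y.getD i 0 := by
  dsimp only [toTheSameLength]
  split <;> split <;> first | exact pad_getD Y _ i | rfl

theorem tsl_fst_len (X Y : List Int) :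
    (toTheSameLength X Y).1.length = max X.length Y.length := by
  dsimp only [toTheSameLength]
  split <;> simp <;> omega

-- the core bridge: A's index-down while loop equals the descending highest-difference function,
-- provided the two pairs of lists agree under getD at every index
theorem cmpLoop_eq_hiDiff (i : Nat) (A B A' B' : List Int)
    (hA : ∀ j, A.getD j 0 = A'.getD j 0) (hB : ∀ j, B.getD j 0 = B'.getD j 0) :
    cmpLoop A B (i : Int) = hiDiff A' B' (i + 1) := by
  induction i with
  | zero =>
    rw [cmpLoop, hiDiff]
    simp only [Nat.cast_zero, PySem.List.pyGetD_zero, hA 0, hB 0, List.getD_eq_getElem?_getD]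
    norm_num
    by_cases h : A'[0]?.getD 0 = B'[0]?.getD 0 <;> simp [h, hiDiff]
  | succ n ih =>
    rw [cmpLoop, hiDiff]
    have hlt : ¬ ((n + 1 : Nat) : Int) < 0 := by omega
    have hc : ((n + 1 : Nat) : Int) - 1 = (n : Int) := by omega
    simp only [hlt, if_false, PySem.List.pyGetD_natCast, hc, hA (n+1), hB (n+1),
      List.getD_eq_getElem?_getD]
    by_cases h : A'[n+1]?.getD 0 = B'[n+1]?.getD 0 <;> simp [h, ih]

theorem hiDiff_stable (A B : List Int) (n k : Nat)
    (h : ∀ j, n ≤ j → A.getD j 0 = B.getD j 0) :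
    hiDiff A B (n + k) = hiDiff A B n := by
  induction k with
  | zero => rfl
  | succ m ih =>
    have hj : A.getD (n + m) 0 = B.getD (n + m) 0 := h _ (by omega)
    rw [List.getD_eq_getElem?_getD, List.getD_eq_getElem?_getD] at hj
    rw [show n + (m + 1) = (n + m) + 1 from rfl, hiDiff]
    simp [hj, ih]

-- ===== VERDICT (by name: the statement is the Claim_ definition above) =====
theorem longCmp_spec : Claim_equal_longCmp := by
  intro A B _
  unfold Spec_longCmp longCmp
  rw [longCmp_alt_eq]
  dsimp only
  have h1A : 1 ≤ (deleteExtraZeros A).length := List.length_pos_iff.mpr (dez_ne_nil A)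
  have hlen : (toTheSameLength (deleteExtraZeros A) (deleteExtraZeros B)).1.length
      = max (deleteExtraZeros A).length (deleteExtraZeros B).length := tsl_fst_len _ _
  have hmaxA : (deleteExtraZeros A).length ≤ (toTheSameLength (deleteExtraZeros A) (deleteExtraZeros B)).1.length := by
    rw [hlen]; exact le_max_left _ _
  have hmaxB : (deleteExtraZeros B).length ≤ (toTheSameLength (deleteExtraZeros A) (deleteExtraZeros B)).1.length := by
    rw [hlen]; exact le_max_right _ _
  have hn1 : 1 ≤ (toTheSameLength (deleteExtraZeros A) (deleteExtraZeros B)).1.length := le_trans h1A hmaxA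
  have hAg : ∀ j, (toTheSameLength (deleteExtraZeros A) (deleteExtraZeros B)).1.getD j 0 = A.getD j 0 :=
    fun j => by rw [tsl_fst_getD, dez_getD]
  have hBg : ∀ j, (toTheSameLength (deleteExtraZeros A) (deleteExtraZeros B)).2.getD j 0 = B.getD j 0 :=
    fun j => by rw [tsl_snd_getD, dez_getD]
  rw [show (((toTheSameLength (deleteExtraZeros A) (deleteExtraZeros B)).1.length : Int) - 1)
      = (((toTheSameLength (deleteExtraZeros A) (deleteExtraZeros B)).1.length - 1 : Nat) : Int) by omega,
    cmpLoop_eq_hiDiff _ _ _ A B hAg hBg,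
    show ((toTheSameLength (deleteExtraZeros A) (deleteExtraZeros B)).1.length - 1) + 1
      = (toTheSameLength (deleteExtraZeros A) (deleteExtraZeros B)).1.length by omega]
  -- reconcile the two upper bounds: max of stripped lengths vs max of raw lengths
  have hzero : ∀ j, (toTheSameLength (deleteExtraZeros A) (deleteExtraZeros B)).1.length ≤ j →
      A.getD j 0 = B.getD j 0 := fun j hj => by
    rw [dez_getD_of_ge A j (le_trans hmaxA hj), dez_getD_of_ge B j (le_trans hmaxB hj)]
  have hout : ∀ j, max A.length B.length ≤ j → A.getD j 0 = B.getD j 0 := fun j hj => by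
    rw [List.getD_eq_default _ _ (le_trans (le_max_left _ _) hj),
      List.getD_eq_default _ _ (le_trans (le_max_right _ _) hj)]
  rcases Nat.le_total (toTheSameLength (deleteExtraZeros A) (deleteExtraZeros B)).1.length (max A.length B.length) with h | h
  · have := hiDiff_stable A B _ (max A.length B.length - (toTheSameLength (deleteExtraZeros A) (deleteExtraZeros B)).1.length) hzero
    rw [show (toTheSameLength (deleteExtraZeros A) (deleteExtraZeros B)).1.length
        + (max A.length B.length - (toTheSameLength (deleteExtraZeros A) (deleteExtraZeros B)).1.length)
        = max A.length B.length by omega] at this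
    exact this.symm
  · have := hiDiff_stable A B _ ((toTheSameLength (deleteExtraZeros A) (deleteExtraZeros B)).1.length - max A.length B.length) hout
    rw [show max A.length B.length
        + ((toTheSameLength (deleteExtraZeros A) (deleteExtraZeros B)).1.length - max A.length B.length)
        = (toTheSameLength (deleteExtraZeros A) (deleteExtraZeros B)).1.length by omega] at this
    exact this
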